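-- pv_equiv track=rewrite | github.com/David-Hakobyan1/Different | tkinter/tk.py | filter_file
-- ===== SOURCE A (Python) =====
-- def filter_file(my_file):
--     st = ""
--     l = []
--     for el in my_file:
--         if el != "\n":
--             st+=el
--         else:
--             lis = st.split(":")
--             l.append(lis)
--             st = ""
--     return l
-- ===== SOURCE B (Python) =====
-- def filter_file(my_file):
--     return [piece.split(":") for piece in my_file.split("\n")[:-1]]
-- ===== Notes on version B (the rewrite author's own statement) =====
-- stated objective: simpler
-- what changed: Replaces the character-by-character accumulator loop with a single whole-string split on newlines (dropping the unterminated last segment) followed by a per-line split on colons.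
import Mathlib
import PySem

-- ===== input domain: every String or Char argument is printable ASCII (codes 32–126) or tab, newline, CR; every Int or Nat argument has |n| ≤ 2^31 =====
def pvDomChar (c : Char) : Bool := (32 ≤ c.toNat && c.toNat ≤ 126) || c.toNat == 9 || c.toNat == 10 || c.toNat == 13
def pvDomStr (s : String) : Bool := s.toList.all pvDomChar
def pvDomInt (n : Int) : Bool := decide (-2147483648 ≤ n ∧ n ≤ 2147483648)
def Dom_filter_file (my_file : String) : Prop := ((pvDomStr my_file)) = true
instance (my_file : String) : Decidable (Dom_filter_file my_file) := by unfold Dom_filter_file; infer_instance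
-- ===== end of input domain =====

-- B replaces A's character-by-character accumulation with one split on "\n" (dropping the
-- unterminated trailing segment, which A never emits) followed by a per-line split on ":".

-- ===== PORT A =====
-- literal port of A: iterate over the characters, growing st until a newline,
-- then append st.split(":") to the result list and reset st; the trailing st is dropped
def filter_file (my_file : String) : List (List String) :=
  (my_file.toList.foldl
    (fun (s : List Char × List (List String)) (el : Char) =>
      if el ≠ '\n' then (s.1 ++ [el], s.2)
      else ([], s.2 ++ [(PySem.Chars.splitOn s.1 [':']).map String.mk]))
    ([], [])).2

-- ===== PORT B =====
-- literal port of Source B: split the whole string on "\n", drop the last piece ([:-1]),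
-- split each remaining piece on ":"  (PySem.Chars.splitOn is s.split(sep) for sep ≠ "")
def filter_file_alt (my_file : String) : List (List String) :=
  ((PySem.Chars.splitOn my_file.toList ['\n']).dropLast).map
    (fun piece => (PySem.Chars.splitOn piece [':']).map String.mk)

-- ===== PRECONDITION & SPEC =====
def Spec_filter_file (my_file : String) (out : List (List String)) : Prop := out = filter_file_alt my_file
instance (my_file : String) (out : List (List String)) : Decidable (Spec_filter_file my_file out) := by unfold Spec_filter_file; infer_instance

-- ===== CLAIM (what is proved, stated in full; the proofs are below) =====
def Claim_equal_filter_file : Prop := ∀ (my_file : String), Dom_filter_file my_file → Spec_filter_file my_file (filter_file my_file)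

-- ===== LEMMAS AND PROOFS =====

/-- Single-separator split by direct structural recursion, with the pending prefix explicit;
    this is exactly the shape of A's loop state. -/
def splitOnChar (c : Char) (pre : List Char) : List Char → List (List Char)
  | [] => [pre]
  | x :: xs => if x = c then pre :: splitOnChar c [] xs else splitOnChar c (pre ++ [x]) xs

theorem splitOn_go_char (c : Char) :
    ∀ (fuel : Nat) (l cur : List Char) (acc : List (List Char)), l.length ≤ fuel →
      PySem.Chars.splitOn.go [c] fuel l cur acc = acc.reverse ++ splitOnChar c cur.reverse l := by
  intro fuel
  induction fuel with
  | zero =>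
    intro l cur acc h
    have : l = [] := List.length_eq_zero_iff.mp (Nat.le_zero.mp h)
    subst this
    simp [PySem.Chars.splitOn.go, splitOnChar]
  | succ n ih =>
    intro l cur acc h
    cases l with
    | nil => simp [PySem.Chars.splitOn.go, splitOnChar]
    | cons x xs =>
      rw [PySem.Chars.splitOn.go]
      simp at h
      by_cases hx : x = c
      · subst hx
        simp only [List.isPrefixOf, BEq.rfl, Bool.true_and,
          if_pos, List.length_singleton, List.drop_succ_cons, List.drop_zero]
        rw [ih xs [] _ (by omega)]
        simp [splitOnChar]
      · have hp : ([c].isPrefixOf (x :: xs)) = false := by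
          simp [List.isPrefixOf, Ne.symm hx]
        rw [hp]
        simp only [Bool.false_eq_true, if_false]
        rw [ih xs (x :: cur) acc (by omega)]
        simp [splitOnChar, hx]

theorem splitOn_eq_splitOnChar (c : Char) (s : List Char) :
    PySem.Chars.splitOn s [c] = splitOnChar c [] s := by
  have := splitOn_go_char c (s.length + 1) s [] [] (by omega)
  simpa [PySem.Chars.splitOn] using this

theorem splitOnChar_ne_nil (c : Char) (pre : List Char) (l : List Char) :
    splitOnChar c pre l ≠ [] := by
  induction l generalizing pre with
  | nil => simp [splitOnChar]
  | cons x xs ih => by_cases h : x = c <;> simp [splitOnChar, h, ih]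

/-- A's loop body, named for the invariant proof (definitionally the lambda in `filter_file`). -/
def fStep (s : List Char × List (List String)) (el : Char) : List Char × List (List String) :=
  if el ≠ '\n' then (s.1 ++ [el], s.2)
  else ([], s.2 ++ [(PySem.Chars.splitOn s.1 [':']).map String.mk])

theorem fold_invariant (cs : List Char) :
    ∀ (st : List Char) (acc : List (List String)),
      (cs.foldl fStep (st, acc)).2 =
        acc ++ ((splitOnChar '\n' st cs).dropLast).map
          (fun p => (PySem.Chars.splitOn p [':']).map String.mk) := by
  induction cs with
  | nil => intro st acc; simp [splitOnChar]
  | cons x xs ih =>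
    intro st acc
    by_cases hx : x = '\n'
    · subst hx
      simp only [List.foldl_cons, fStep, ne_eq, not_true_eq_false, if_false, ite_false]
      rw [ih [] _]
      have hne := splitOnChar_ne_nil '\n' ([] : List Char) xs
      simp [splitOnChar, List.dropLast_cons_of_ne_nil hne]
    · simp only [List.foldl_cons, fStep, ne_eq, hx, not_false_eq_true, if_pos, ite_true]
      rw [ih (st ++ [x]) acc]
      simp [splitOnChar, hx]

-- ===== VERDICT (by name: the statement is the Claim_ definition above) =====
theorem filter_file_spec : Claim_equal_filter_file := by
  intro my_file _
  show filter_file my_file = filter_file_alt my_file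
  have hA : filter_file my_file = (my_file.toList.foldl fStep ([], [])).2 := rfl
  rw [hA, fold_invariant my_file.toList [] []]
  simp [filter_file_alt, splitOn_eq_splitOnChar]
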